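-- pv_equiv track=rewrite | github.com/dolgodolah/TIL | algorithm/Programmers/Level 3/숫자 게임.py | solution
-- ===== SOURCE A (Python) =====
-- def solution(A, B):
--     answer = 0
--     A.sort()#1357
--     B.sort()#2268
--     while A:
--         if A[0]<B[0]:
--             A.pop(0)
--             B.pop(0)
--             answer+=1
--         else:
--             A.pop()
--             B.pop(0)
--     return answer
-- ===== SOURCE B (Python) =====
-- def solution(A, B):
--     # Return-value equivalent to A; does not mutate A/B (A's version empties both in place).
--     sa = sorted(A)
--     i = 0
--     for b in sorted(B)[:len(A)]:
--         if sa[i] < b: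
--             i += 1
--     return i
-- ===== Notes on version B (the rewrite author's own statement) =====
-- stated objective: faster
-- what changed: replaces the destructive while-loop with quadratic pop(0)/pop() on both lists by a single index sweep over the sorted copies (one pointer into sorted A advanced on each win), no list mutation at all
import Mathlib
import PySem

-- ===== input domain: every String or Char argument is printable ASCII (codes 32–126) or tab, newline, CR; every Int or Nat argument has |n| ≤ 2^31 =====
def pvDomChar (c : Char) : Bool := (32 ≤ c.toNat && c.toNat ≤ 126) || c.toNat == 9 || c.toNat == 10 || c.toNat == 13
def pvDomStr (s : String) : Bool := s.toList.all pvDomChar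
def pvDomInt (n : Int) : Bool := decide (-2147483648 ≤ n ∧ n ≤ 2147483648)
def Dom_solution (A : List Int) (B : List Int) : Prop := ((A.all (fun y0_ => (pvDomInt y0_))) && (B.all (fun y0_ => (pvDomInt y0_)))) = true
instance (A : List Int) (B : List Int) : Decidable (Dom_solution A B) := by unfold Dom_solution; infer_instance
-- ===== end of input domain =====

-- B replaces A's destructive pop(0)/pop() while-loop by one index sweep over the sorted
-- copies (faster, no mutation); equivalence is about the RETURN value only — Python A
-- empties both argument lists in place, B leaves them untouched.

-- ===== PORT A =====
-- the while-loop: each iteration pops one element of A (front or back) and the front of B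
def solutionLoop : List Int → List Int → Int → Int
  | [], _, answer => answer
  | _ :: _, [], answer => answer  -- Python raises IndexError here (B[0] on empty B); excluded by Pre_
  | a :: A', b :: B', answer =>
    if a < b then solutionLoop A' B' (answer + 1)
    else solutionLoop ((a :: A').dropLast) B' answer
termination_by A _ _ => A.length
decreasing_by
  · simp
  · simp

def solution (A : List Int) (B : List Int) : Int :=
  solutionLoop (PySem.List.sorted A (fun x => x) false) (PySem.List.sorted B (fun x => x) false) 0

-- ===== PORT B =====
-- one step of B's for-loop: 'if sa[i] < b: i += 1'
def altStep (sa : List Int) (i : Int) (b : Int) : Int :=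
  match PySem.List.pyGet? sa i with
  | some a => if a < b then i + 1 else i
  | none => i  -- IndexError in Python; never reached (i stays below len(sa) during the loop)

def solution_alt (A : List Int) (B : List Int) : Int :=
  let sa := PySem.List.sorted A (fun x => x) false
  let sb := PySem.List.slice (PySem.List.sorted B (fun x => x) false) none (some (A.length : Int))
  sb.foldl (altStep sa) 0

-- ===== PRECONDITION & SPEC =====
-- Python A pops B once per iteration of a loop that runs len(A) times, so it raises
-- IndexError exactly when B is shorter than A; those inputs are excluded.
def Pre_solution (A : List Int) (B : List Int) : Prop := A.length ≤ B.length
instance (A : List Int) (B : List Int) : Decidable (Pre_solution A B) := by unfold Pre_solution; infer_instance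

def pvWitness_solution : List Int × List Int := ([1, 3], [2, 4])

def Spec_solution (A : List Int) (B : List Int) (out : Int) : Prop := out = solution_alt A B
instance (A : List Int) (B : List Int) (out : Int) : Decidable (Spec_solution A B out) := by unfold Spec_solution; infer_instance

-- ===== CLAIM (what is proved, stated in full; the proofs are below) =====
def Claim_equal_solution : Prop := ∀ (A : List Int) (B : List Int), Dom_solution A B → Pre_solution A B → Spec_solution A B (solution A B)

-- ===== LEMMAS AND PROOFS =====

-- Loop correspondence: A's loop on the segment L of sa = pre ++ L ++ suf, with the wins
-- counter folded into the accumulator, equals B's fold with index starting at |pre|.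
theorem loop_fold (M L pre suf : List Int) (c : Int) :
    solutionLoop L M (c + pre.length) =
      c + (M.take L.length).foldl (altStep (pre ++ L ++ suf)) (pre.length : Int) := by
  induction M generalizing L pre suf c with
  | nil =>
    cases L <;> simp [solutionLoop]
  | cons b M' ih =>
    cases L with
    | nil => simp [solutionLoop]
    | cons a L' =>
      have hget : PySem.List.pyGet? (pre ++ (a :: L') ++ suf) (pre.length : Int) = some a := by
        rw [List.append_assoc, List.cons_append]
        exact PySem.List.pyGet?_append_length pre (L' ++ suf) a
      simp only [List.length_cons, List.take_succ_cons, List.foldl_cons, solutionLoop,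
        altStep, hget]
      by_cases hab : a < b
      · simp only [hab, if_pos]
        have := ih L' (pre ++ [a]) suf c
        simpa [add_assoc] using this
      · simp only [hab, if_neg, not_false_iff]
        have hrw : pre ++ (a :: L') ++ suf
            = pre ++ (a :: L').dropLast ++ ((a :: L').getLast (by simp) :: suf) := by
          rw [List.append_assoc, List.append_assoc]
          congr 1
          rw [show ((a :: L').getLast (by simp)) :: suf
              = [((a :: L').getLast (by simp))] ++ suf from rfl,
            ← List.append_assoc, List.dropLast_concat_getLast]
        have hlen : (a :: L').dropLast.length = L'.length := by simp
        rw [hrw, ← hlen]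
        exact ih ((a :: L').dropLast) pre ((a :: L').getLast (by simp) :: suf) c

-- ===== VERDICT (by name: the statement is the Claim_ definition above) =====
theorem solution_spec : Claim_equal_solution := by
  intro A B _ _
  unfold Spec_solution solution solution_alt
  have h := loop_fold (PySem.List.sorted B (fun x => x) false)
      (PySem.List.sorted A (fun x => x) false) [] [] 0
  simp only [List.length_nil, Nat.cast_zero, add_zero, List.append_nil, List.nil_append,
    zero_add] at h
  rw [h]
  congr 1
  rw [PySem.List.slice_to_natCast]
  congr 1
  simp [PySem.List.length_sorted]
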